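-- pv_equiv track=rewrite | github.com/Shtoong/EnglishHelper | gui/audio_manager.py | _extract_audio_urls
-- ===== SOURCE A (Python) =====
-- from typing import List, Dict, Optional, Tuple
--
-- def _extract_audio_urls(phonetics: List[Dict]) -> Tuple[Optional[str], Optional[str]]:
--     """
--     Извлекает US и UK аудио URL из phonetics с приоритетом.
--
--     Приоритет поиска:
--     1. Точное совпадение: "-us.mp3" / "-uk.mp3" в URL
--     2. Язык в URL: "en-US" / "en-GB"
--     3. Fallback: первые два доступных URL
--
--     Args:
--         phonetics: Список phonetics объектов
--
--     Returns:
--         (us_url, uk_url) - может содержать None если не найдено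
--     """
--     # Приоритетный поиск US
--     us = next(
--         (p["audio"] for p in phonetics
--          if "-us.mp3" in p.get("audio", "").lower() or "en-US" in p.get("audio", "")),
--         None
--     )
--
--     # Приоритетный поиск UK
--     uk = next(
--         (p["audio"] for p in phonetics
--          if "-uk.mp3" in p.get("audio", "").lower() or "en-GB" in p.get("audio", "")),
--         None
--     )
--
--     # Fallback: используем первые доступные URL если не нашли приоритетные
--     if not us or not uk:
--         available = [p["audio"] for p in phonetics if p.get("audio")]
--         us = us or (available[0] if len(available) > 0 else None)
--         uk = uk or (available[1] if len(available) > 1 else None)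
--
--     return us, uk
-- ===== SOURCE B (Python) =====
-- def _extract_audio_urls(phonetics):
--     """Single pass over phonetics collecting us, uk and the available list at once."""
--     us = None
--     uk = None
--     available = []
--     for p in phonetics:
--         audio = p.get("audio", "")
--         if us is None and ("-us.mp3" in audio.lower() or "en-US" in audio):
--             us = audio
--         if uk is None and ("-uk.mp3" in audio.lower() or "en-GB" in audio):
--             uk = audio
--         if audio:
--             available.append(audio)
--     us = us or (available[0] if len(available) > 0 else None)
--     uk = uk or (available[1] if len(available) > 1 else None)
--     return us, uk
-- ===== Notes on version B (the rewrite author's own statement) =====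
-- stated objective: simpler
-- what changed: Three separate passes (two next() generator searches plus a list comprehension) are replaced by one loop that tracks us, uk and the available list simultaneously, with the fallback applied unconditionally via 'or'.
import Mathlib
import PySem

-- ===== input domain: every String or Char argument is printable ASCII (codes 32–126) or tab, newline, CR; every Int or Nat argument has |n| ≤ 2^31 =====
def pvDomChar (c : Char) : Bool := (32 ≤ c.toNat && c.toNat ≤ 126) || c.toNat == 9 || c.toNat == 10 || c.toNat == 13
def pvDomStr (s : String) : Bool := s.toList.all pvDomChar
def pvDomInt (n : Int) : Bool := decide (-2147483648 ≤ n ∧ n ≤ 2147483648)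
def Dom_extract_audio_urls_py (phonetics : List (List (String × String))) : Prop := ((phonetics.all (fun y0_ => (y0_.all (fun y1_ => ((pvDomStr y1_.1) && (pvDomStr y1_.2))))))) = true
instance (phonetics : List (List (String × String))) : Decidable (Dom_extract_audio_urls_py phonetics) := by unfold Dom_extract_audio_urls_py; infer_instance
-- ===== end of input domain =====

-- B replaces A's three passes (two next() searches + a comprehension) with one loop
-- that maintains us, uk and the available list together; same return value (objective: simpler).

-- shared helpers: p.get("audio", "") and the two match predicates, Python-exact
def pvAudio (p : List (String × String)) : String :=
  PySem.Dict.getD (PySem.Dict.mk p) "audio" ""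

def pvCondUS (a : String) : Bool :=
  PySem.Str.isIn "-us.mp3" (PySem.Str.lower a) || PySem.Str.isIn "en-US" a

def pvCondUK (a : String) : Bool :=
  PySem.Str.isIn "-uk.mp3" (PySem.Str.lower a) || PySem.Str.isIn "en-GB" a

-- Python truthiness of an Optional[str]
def pvTruthy : Option String → Bool
  | none => false
  | some s => !(s == "")

-- `x or y` on Optional[str]
def pvOr (o x : Option String) : Option String :=
  if pvTruthy o then o else x

-- ===== PORT A =====
-- next((p["audio"] for p in phonetics if cond), None): the first match;
-- when cond holds the key "audio" is present, so p["audio"] = pvAudio p exactly.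
def extract_audio_urls_py (phonetics : List (List (String × String))) : Option String × Option String :=
  let us := (phonetics.find? (fun p => pvCondUS (pvAudio p))).map pvAudio
  let uk := (phonetics.find? (fun p => pvCondUK (pvAudio p))).map pvAudio
  if !pvTruthy us || !pvTruthy uk then
    let available := phonetics.filterMap
      (fun p => if pvAudio p ≠ "" then some (pvAudio p) else none)
    (pvOr us available[0]?, pvOr uk available[1]?)
  else (us, uk)

-- ===== PORT B =====
-- the single for-loop of Source B, carrying (us, uk, available)
def pvLoop : List (List (String × String)) → Option String → Option String → List String →
    Option String × Option String × List String
  | [], us, uk, av => (us, uk, av)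
  | p :: rest, us, uk, av =>
    let a := pvAudio p
    let us' := if us.isNone && pvCondUS a then some a else us
    let uk' := if uk.isNone && pvCondUK a then some a else uk
    let av' := if a ≠ "" then av ++ [a] else av
    pvLoop rest us' uk' av'

def extract_audio_urls_py_alt (phonetics : List (List (String × String))) : Option String × Option String :=
  let r := pvLoop phonetics none none []
  (pvOr r.1 r.2.2[0]?, pvOr r.2.1 r.2.2[1]?)

-- ===== PRECONDITION & SPEC =====
def Spec_extract_audio_urls_py (phonetics : List (List (String × String))) (out : Option String × Option String) : Prop := out = extract_audio_urls_py_alt phonetics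
instance (phonetics : List (List (String × String))) (out : Option String × Option String) : Decidable (Spec_extract_audio_urls_py phonetics out) := by unfold Spec_extract_audio_urls_py; infer_instance

-- ===== CLAIM (what is proved, stated in full; the proofs are below) =====
def Claim_equal_extract_audio_urls_py : Prop := ∀ (phonetics : List (List (String × String))), Dom_extract_audio_urls_py phonetics → Spec_extract_audio_urls_py phonetics (extract_audio_urls_py phonetics)

-- ===== LEMMAS AND PROOFS =====

-- loop invariant: pvLoop keeps the first matches (via Option.or) and appends the available URLs
theorem pvLoop_spec (xs : List (List (String × String))) :
    ∀ us uk av, pvLoop xs us uk av =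
      (us.or ((xs.find? (fun p => pvCondUS (pvAudio p))).map pvAudio),
       uk.or ((xs.find? (fun p => pvCondUK (pvAudio p))).map pvAudio),
       av ++ xs.filterMap (fun p => if pvAudio p ≠ "" then some (pvAudio p) else none)) := by
  induction xs with
  | nil => intro us uk av; simp [pvLoop]
  | cons p rest ih =>
    intro us uk av
    simp only [pvLoop, ih, List.find?, List.filterMap]
    cases us <;> cases uk <;>
      cases hUS : pvCondUS (pvAudio p) <;> cases hUK : pvCondUK (pvAudio p) <;>
      by_cases hA : pvAudio p = "" <;>
      simp [hA, Option.or]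

theorem pvOr_of_truthy (o x : Option String) (h : pvTruthy o = true) : pvOr o x = o := by
  simp [pvOr, h]

-- ===== VERDICT (by name: the statement is the Claim_ definition above) =====
theorem extract_audio_urls_py_spec : Claim_equal_extract_audio_urls_py := by
  intro phonetics _
  show extract_audio_urls_py phonetics = extract_audio_urls_py_alt phonetics
  unfold extract_audio_urls_py extract_audio_urls_py_alt
  rw [pvLoop_spec]
  simp only [Option.or, List.nil_append]
  split_ifs with h
  · rfl
  · -- both us and uk truthy: the unconditional pvOr of B returns them unchanged
    simp only [Bool.or_eq_true, not_or, Bool.not_eq_true', Bool.not_eq_false] at h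
    rw [pvOr_of_truthy _ _ h.1, pvOr_of_truthy _ _ h.2]
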